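-- pv_equiv track=rewrite | github.com/ht1505/elevator-soft-computing | research/strategies/common.py | look_route
-- ===== SOURCE A (Python) =====
-- from typing import Dict, List, Optional
--
-- def look_route(start_floor: int, stops: List[int], direction: str) -> List[int]:
--     """
--     Sort a list of floor stops using the LOOK algorithm.
--
--     LOOK scans in one direction first (serving all stops ahead), then
--     reverses and serves the remaining stops.  This mirrors the behaviour
--     of Elevator._sort_stops() in the root-level elevator.py.
--
--     Args:
--         start_floor: Current integer floor of the elevator.
--         stops:       Unsorted list of floor stops (may contain duplicates).
--         direction:   Current travel direction ("UP" or "DOWN").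
--
--     Returns:
--         Ordered list of unique floor stops.
--     """
--     if not stops:
--         return []
--     uniq  = sorted(set(stops))
--     above = [s for s in uniq if s >= start_floor]
--     below = [s for s in uniq if s <  start_floor]
--
--     if direction == "DOWN":
--         # Serve descending stops first, then sweep up
--         return list(reversed(below)) + list(reversed(above))
--     # Default UP: serve ascending stops first, then sweep down
--     return above + list(reversed(below))
-- ===== SOURCE B (Python) =====
-- def look_route(start_floor, stops, direction):
--     if not stops:
--         return []
--     if direction == "DOWN":
--         key = lambda s: (0, -s) if s < start_floor else (1, -s)
--     else:
--         key = lambda s: (0, s) if s >= start_floor else (1, -s)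
--     return sorted(set(stops), key=key)
-- ===== Notes on version B (the rewrite author's own statement) =====
-- stated objective: simpler
-- what changed: Replaces A's sort-then-partition-into-above/below-then-reverse-and-concatenate structure with a single sorted() call over set(stops) using a direction-dependent lexicographic key that yields the LOOK order directly.
import Mathlib
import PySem

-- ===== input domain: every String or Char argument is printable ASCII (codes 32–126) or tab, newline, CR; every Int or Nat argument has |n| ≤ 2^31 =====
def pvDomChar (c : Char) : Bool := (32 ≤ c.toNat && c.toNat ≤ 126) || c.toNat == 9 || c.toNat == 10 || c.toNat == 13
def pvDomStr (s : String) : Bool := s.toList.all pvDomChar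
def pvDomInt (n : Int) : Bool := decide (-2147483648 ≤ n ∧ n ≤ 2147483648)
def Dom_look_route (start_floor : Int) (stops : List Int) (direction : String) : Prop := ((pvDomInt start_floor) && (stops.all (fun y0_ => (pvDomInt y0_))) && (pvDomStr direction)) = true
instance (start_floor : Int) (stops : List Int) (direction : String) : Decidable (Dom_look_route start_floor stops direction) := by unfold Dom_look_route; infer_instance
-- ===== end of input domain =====

-- B replaces A's sort-then-partition-then-reverse-and-concatenate structure with a single
-- keyed sort over the deduplicated stops (objective: simpler).

-- ===== PORT A =====
def look_route (start_floor : Int) (stops : List Int) (direction : String) : List Int :=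
  if stops = [] then []
  else
    let uniq := PySem.List.sorted (PySem.Set.ofList stops) (fun x => x) false
    let above := uniq.filter (fun s => decide (s ≥ start_floor))
    let below := uniq.filter (fun s => decide (s < start_floor))
    if direction = "DOWN" then below.reverse ++ above.reverse
    else above ++ below.reverse

-- ===== PORT B =====
def look_route_alt (start_floor : Int) (stops : List Int) (direction : String) : List Int :=
  if stops = [] then []
  else if direction = "DOWN" then
    PySem.List.sorted2 (PySem.Set.ofList stops)
      (fun s => if s < start_floor then (0 : Int) else 1) (fun s => -s) false
  else
    PySem.List.sorted2 (PySem.Set.ofList stops)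
      (fun s => if s ≥ start_floor then (0 : Int) else 1)
      (fun s => if s ≥ start_floor then s else -s) false

-- ===== PRECONDITION & SPEC =====
def Spec_look_route (start_floor : Int) (stops : List Int) (direction : String) (out : List Int) : Prop := out = look_route_alt start_floor stops direction
instance (start_floor : Int) (stops : List Int) (direction : String) (out : List Int) : Decidable (Spec_look_route start_floor stops direction out) := by unfold Spec_look_route; infer_instance

-- ===== CLAIM (what is proved, stated in full; the proofs are below) =====
def Claim_equal_look_route : Prop := ∀ (start_floor : Int) (stops : List Int) (direction : String), Dom_look_route start_floor stops direction → Spec_look_route start_floor stops direction (look_route start_floor stops direction)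

-- ===== LEMMAS AND PROOFS =====

-- sorted2 with integer key components is the plain sort under the lexicographic pair key.
theorem sorted2_eq_sorted_lex (xs : List Int) (k1 k2 : Int → Int) :
    PySem.List.sorted2 xs k1 k2 false
      = PySem.List.sorted xs (fun s => toLex ((k1 s, k2 s) : Int × Int)) false := by
  rw [PySem.List.sorted_eq_foldl_insertBy]
  show List.foldl _ [] xs = List.foldl _ [] xs
  congr 1
  funext acc x
  congr 1
  funext a b
  have h : (toLex ((k1 a, k2 a) : Int × Int) < toLex ((k1 b, k2 b) : Int × Int))
      ↔ (k1 a < k1 b ∨ k1 a = k1 b ∧ k2 a < k2 b) := Prod.Lex.lt_iff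
  by_cases h1 : k1 a < k1 b <;> by_cases h2 : k1 b < k1 a <;> by_cases h3 : k2 a < k2 b <;>
    simp [h1, h2, h3, h] <;> omega

theorem look_route_spec_aux (start_floor : Int) (stops : List Int) (direction : String) :
    look_route start_floor stops direction = look_route_alt start_floor stops direction := by
  unfold look_route look_route_alt
  by_cases hs : stops = []
  · simp [hs]
  · simp only [hs, if_false]
    set u := PySem.List.sorted (PySem.Set.ofList stops) (fun x => x) false with hu
    have hperm : u.Perm (PySem.Set.ofList stops) := PySem.List.sorted_perm _ _ _
    have hucr : u.Pairwise (· < ·) := PySem.List.sorted_ofList_pairwise_lt stops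
    have hsplit : (u.filter (fun s => decide (s ≥ start_floor))
        ++ u.filter (fun s => decide (s < start_floor))).Perm u := by
      have hcongr : u.filter (fun s => decide (s < start_floor))
          = u.filter (fun s => !(decide (s ≥ start_floor))) := by
        apply List.filter_congr
        intro x _
        by_cases hx : x < start_floor
        all_goals simp [hx]
        all_goals omega
      rw [hcongr]
      exact List.filter_append_perm _ u
    have habove : ∀ x ∈ u.filter (fun s => decide (s ≥ start_floor)), start_floor ≤ x := by
      intro x hx
      have := (List.mem_filter.mp hx).2
      simpa using this
    have hbelow : ∀ x ∈ u.filter (fun s => decide (s < start_floor)), x < start_floor := by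
      intro x hx
      have := (List.mem_filter.mp hx).2
      simpa using this
    have habove_lt : (u.filter (fun s => decide (s ≥ start_floor))).Pairwise (· < ·) :=
      hucr.filter _
    have hbelow_lt : (u.filter (fun s => decide (s < start_floor))).Pairwise (· < ·) :=
      hucr.filter _
    by_cases hd : direction = "DOWN"
    · simp only [hd, if_true]
      rw [sorted2_eq_sorted_lex]
      symm
      apply PySem.List.sorted_eq_of_perm_of_pairwise_lt
      · refine List.Perm.trans ?_ (List.Perm.trans hsplit hperm)
        refine List.Perm.trans
          (List.Perm.append ((u.filter _).reverse_perm) ((u.filter _).reverse_perm)) ?_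
        exact List.perm_append_comm
      · rw [List.pairwise_append]
        refine ⟨?_, ?_, ?_⟩
        · rw [List.pairwise_reverse]
          refine List.Pairwise.imp_of_mem ?_ hbelow_lt
          intro a b ha hb hab
          have ha' := hbelow a ha
          have hb' := hbelow b hb
          rw [Prod.Lex.lt_iff]
          simp only [ofLex_toLex]
          split_ifs
          all_goals omega
        · rw [List.pairwise_reverse]
          refine List.Pairwise.imp_of_mem ?_ habove_lt
          intro a b ha hb hab
          have ha' := habove a ha
          have hb' := habove b hb
          rw [Prod.Lex.lt_iff]
          simp only [ofLex_toLex]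
          split_ifs
          all_goals omega
        · intro a ha b hb
          have ha' := hbelow a (List.mem_reverse.mp ha)
          have hb' := habove b (List.mem_reverse.mp hb)
          rw [Prod.Lex.lt_iff]
          simp only [ofLex_toLex]
          split_ifs
          all_goals omega
    · simp only [hd, if_false]
      rw [sorted2_eq_sorted_lex]
      symm
      apply PySem.List.sorted_eq_of_perm_of_pairwise_lt
      · refine List.Perm.trans ?_ (List.Perm.trans hsplit hperm)
        exact List.Perm.append_left _ ((u.filter _).reverse_perm)
      · rw [List.pairwise_append]
        refine ⟨?_, ?_, ?_⟩
        · refine List.Pairwise.imp_of_mem ?_ habove_lt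
          intro a b ha hb hab
          have ha' := habove a ha
          have hb' := habove b hb
          rw [Prod.Lex.lt_iff]
          simp only [ofLex_toLex]
          split_ifs
          all_goals omega
        · rw [List.pairwise_reverse]
          refine List.Pairwise.imp_of_mem ?_ hbelow_lt
          intro a b ha hb hab
          have ha' := hbelow a ha
          have hb' := hbelow b hb
          rw [Prod.Lex.lt_iff]
          simp only [ofLex_toLex]
          split_ifs
          all_goals omega
        · intro a ha b hb
          have ha' := habove a ha
          have hb' := hbelow b (List.mem_reverse.mp hb)
          rw [Prod.Lex.lt_iff]
          simp only [ofLex_toLex]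
          split_ifs
          all_goals omega

-- ===== VERDICT (by name: the statement is the Claim_ definition above) =====
theorem look_route_spec : Claim_equal_look_route := by
  intro s st d _
  exact look_route_spec_aux s st d
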